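-- pv_equiv track=rewrite | github.com/rahenvay/exam-scheduling-heuristic | exam_scheduler.py | build_conflict_matrix
-- ===== SOURCE A (Python) =====
-- from collections import defaultdict
--
-- def build_conflict_matrix(course_students):
--     course_list = list(course_students.keys())
--     conflicts = defaultdict(int)
--
--     for i in range(len(course_list)):
--         for j in range(i + 1, len(course_list)):
--             c1 = course_list[i]
--             c2 = course_list[j]
--
--             shared_students = len(course_students[c1] & course_students[c2])
--
--             if shared_students > 0:
--                 conflicts[(c1, c2)] = shared_students
--                 conflicts[(c2, c1)] = shared_students
--
--     return dict(conflicts)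
-- ===== SOURCE B (Python) =====
-- def build_conflict_matrix(course_students):
--     courses = list(course_students.keys())
--
--     # invert once: student -> courses containing the student, in course order
--     student_courses = {}
--     for c in courses:
--         for s in course_students[c]:
--             student_courses.setdefault(s, []).append(c)
--
--     # count each co-enrolled (earlier course, later course) pair once per student
--     pair_counts = {}
--     for cs in student_courses.values():
--         for k, c1 in enumerate(cs):
--             for c2 in cs[k + 1:]:
--                 pair_counts[(c1, c2)] = pair_counts.get((c1, c2), 0) + 1
--
--     # emit both orientations, walking course pairs in order
--     result = {}
--     for k, c1 in enumerate(courses):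
--         for c2 in courses[k + 1:]:
--             n = pair_counts.get((c1, c2), 0)
--             if n > 0:
--                 result[(c1, c2)] = n
--                 result[(c2, c1)] = n
--     return result
-- ===== Notes on version B (the rewrite author's own statement) =====
-- stated objective: faster
-- what changed: B inverts the dict to student->courses and counts each co-enrolled course pair once per student (one pass over enrolments plus a lookup-only emission pass), instead of intersecting the two student sets for every course pair.
import Mathlib
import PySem

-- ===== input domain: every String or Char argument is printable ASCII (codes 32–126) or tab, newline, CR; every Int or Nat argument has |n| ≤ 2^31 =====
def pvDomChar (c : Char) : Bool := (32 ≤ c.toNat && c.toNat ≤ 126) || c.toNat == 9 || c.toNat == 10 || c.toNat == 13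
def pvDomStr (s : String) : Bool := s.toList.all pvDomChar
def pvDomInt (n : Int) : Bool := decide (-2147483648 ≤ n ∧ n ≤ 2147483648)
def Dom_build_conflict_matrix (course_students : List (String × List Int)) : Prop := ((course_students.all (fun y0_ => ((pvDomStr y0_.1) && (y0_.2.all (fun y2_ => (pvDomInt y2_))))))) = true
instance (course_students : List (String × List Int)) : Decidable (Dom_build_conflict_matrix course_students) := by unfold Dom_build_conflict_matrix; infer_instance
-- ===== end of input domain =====

-- B replaces A's per-pair set intersections by one inversion to student->courses with
-- per-student pair counting (measurably faster on the generated timing inputs).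

-- ===== PORT A =====
-- `course_students[c]`: first-match dict lookup (every key queried by A is present).
def pvLookupA (course_students : List (String × List Int)) (c : String) : List Int :=
  (List.lookup c course_students).getD []

-- A's double loop `for i in range(len): for j in range(i+1, len)` over `course_list`,
-- rendered as the structural recursion on suffixes (iteration i sees course_list[i]
-- and the elements after it).
def pvLoopA (course_students : List (String × List Int)) :
    List String → PySem.Dict (String × String) Int → PySem.Dict (String × String) Int
  | [], conflicts => conflicts
  | c1 :: rest, conflicts =>
      pvLoopA course_students rest
        (rest.foldl (fun conflicts c2 =>
          let shared : Int :=
            PySem.Set.len (PySem.Set.inter (pvLookupA course_students c1) (pvLookupA course_students c2))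
          if shared > 0 then (conflicts.insert (c1, c2) shared).insert (c2, c1) shared
          else conflicts) conflicts)

def build_conflict_matrix (course_students : List (String × List Int)) : List (String × String × Int) :=
  let course_list := course_students.map (·.1)
  let conflicts := pvLoopA course_students course_list PySem.Dict.empty
  -- `dict(conflicts)`: the ((c1,c2),n) items flattened to the return type's triples
  conflicts.items.map (fun p => (p.1.1, p.1.2, p.2))

-- ===== PORT B =====
-- (course_students[c] in Source B is the same first-match dict lookup, pvLookupA above)
-- `student_courses.setdefault(s, []).append(c)` = modify key s, default [], appending c
def pvInvertB (course_students : List (String × List Int)) (courses : List String) :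
    PySem.Dict Int (List String) :=
  courses.foldl (fun d c =>
    (pvLookupA course_students c).foldl (fun d s => d.modify s [] (· ++ [c])) d)
    PySem.Dict.empty

-- `for k, c1 in enumerate(cs): for c2 in cs[k+1:]` — suffix recursion; each inner step
-- does `pair_counts[(c1,c2)] = pair_counts.get((c1,c2), 0) + 1`
def pvCountLoopB : List String → PySem.Dict (String × String) Int → PySem.Dict (String × String) Int
  | [], pc => pc
  | c1 :: rest, pc =>
      pvCountLoopB rest (rest.foldl (fun pc c2 => pc.insert (c1, c2) (pc.getD (c1, c2) 0 + 1)) pc)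

-- the emission loop over course pairs, reading pair_counts
def pvEmitLoopB (pair_counts : PySem.Dict (String × String) Int) :
    List String → PySem.Dict (String × String) Int → PySem.Dict (String × String) Int
  | [], result => result
  | c1 :: rest, result =>
      pvEmitLoopB pair_counts rest
        (rest.foldl (fun result c2 =>
          let n := pair_counts.getD (c1, c2) 0
          if n > 0 then (result.insert (c1, c2) n).insert (c2, c1) n else result) result)

def build_conflict_matrix_alt (course_students : List (String × List Int)) : List (String × String × Int) :=
  let courses := course_students.map (·.1)
  let student_courses := pvInvertB course_students courses
  let pair_counts := student_courses.values.foldl (fun pc cs => pvCountLoopB cs pc) PySem.Dict.empty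
  let result := pvEmitLoopB pair_counts courses PySem.Dict.empty
  result.items.map (fun p => (p.1.1, p.1.2, p.2))

-- ===== PRECONDITION & SPEC =====
-- Pre_ only pins the dict-of-sets representation the Python argument always has:
-- unique course keys, and no duplicates inside a student list (a Python set).
def Pre_build_conflict_matrix (course_students : List (String × List Int)) : Prop :=
  (course_students.map Prod.fst).Nodup ∧ ∀ p ∈ course_students, p.2.Nodup
instance (course_students : List (String × List Int)) : Decidable (Pre_build_conflict_matrix course_students) := by
  unfold Pre_build_conflict_matrix; infer_instance

def pvWitness_build_conflict_matrix : (List (String × List Int)) :=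
  [("a", [1, 2]), ("b", [2, 3]), ("c", [])]

def Spec_build_conflict_matrix (course_students : List (String × List Int)) (out : List (String × String × Int)) : Prop := out = build_conflict_matrix_alt course_students
instance (course_students : List (String × List Int)) (out : List (String × String × Int)) : Decidable (Spec_build_conflict_matrix course_students out) := by unfold Spec_build_conflict_matrix; infer_instance

-- ===== CLAIM (what is proved, stated in full; the proofs are below) =====
def Claim_equal_build_conflict_matrix : Prop := ∀ (course_students : List (String × List Int)), Dom_build_conflict_matrix course_students → Pre_build_conflict_matrix course_students → Spec_build_conflict_matrix course_students (build_conflict_matrix course_students)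

-- ===== LEMMAS AND PROOFS =====

-- the list of ordered pairs (earlier, later) of a list
def pvPairs : List String → List (String × String)
  | [] => []
  | c :: rest => rest.map (fun c2 => (c, c2)) ++ pvPairs rest

theorem fst_mem_of_mem_pvPairs {p : String × String} : ∀ {cs : List String}, p ∈ pvPairs cs → p.1 ∈ cs := by
  intro cs
  induction cs with
  | nil => simp [pvPairs]
  | cons c rest ih =>
    intro h
    simp only [pvPairs, List.mem_append, List.mem_map] at h
    rcases h with ⟨c2, _, rfl⟩ | h
    · exact List.mem_cons_self
    · exact List.mem_cons_of_mem _ (ih h)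

theorem count_pvPairs {cs : List String} (h : cs.Nodup) (c1 c2 : String) :
    (pvPairs cs).count (c1, c2) = if List.Sublist [c1, c2] cs then 1 else 0 := by
  induction cs with
  | nil => simp [pvPairs]
  | cons c rest ih =>
    rcases List.nodup_cons.mp h with ⟨hc, hrest⟩
    have ihr := ih hrest
    simp only [pvPairs, List.count_append]
    by_cases hcc : c = c1
    · subst hcc
      have h0 : (pvPairs rest).count (c, c2) = 0 := by
        rw [List.count_eq_zero]
        intro hm; exact hc (fst_mem_of_mem_pvPairs hm)
      have hmap : (rest.map (fun x => (c, x))).count (c, c2) = rest.count c2 := by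
        simp only [List.count, List.countP_map]
        apply List.countP_congr
        intro x _
        simp
      rw [h0, hmap]
      have hsub : List.Sublist [c, c2] (c :: rest) ↔ c2 ∈ rest := by
        constructor
        · intro hs
          rcases List.sublist_cons_iff.mp hs with hs | ⟨r, hr, hrs⟩
          · exact absurd (hs.subset List.mem_cons_self) hc
          · cases hr; simpa using hrs.subset List.mem_cons_self
        · intro hm
          exact List.cons_sublist_cons.mpr (List.singleton_sublist.mpr hm)
      simp only [hsub]
      by_cases hm : c2 ∈ rest
      · simp [hm, List.count_eq_one_of_mem hrest hm]
      · simp [hm, List.count_eq_zero_of_not_mem hm]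
    · have hmap : (rest.map (fun x => (c, x))).count (c1, c2) = 0 := by
        rw [List.count_eq_zero]
        simp only [List.mem_map, not_exists]
        rintro x ⟨_, hx⟩
        exact hcc (congrArg Prod.fst hx)
      have hsub : List.Sublist [c1, c2] (c :: rest) ↔ List.Sublist [c1, c2] rest := by
        constructor
        · intro hs
          rcases List.sublist_cons_iff.mp hs with hs | ⟨r, hr, _⟩
          · exact hs
          · exact absurd (congrArg (List.head? ·) hr) (by simp; exact fun hh => hcc hh.symm)
        · exact fun hs => hs.cons c
      rw [hmap, ihr]; simp only [hsub, Nat.zero_add]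

theorem pvCountLoopB_eq (cs : List String) (pc : PySem.Dict (String × String) Int) :
    pvCountLoopB cs pc = (pvPairs cs).foldl (fun pc k => pc.insert k (pc.getD k 0 + 1)) pc := by
  induction cs generalizing pc with
  | nil => rfl
  | cons c rest ih =>
    simp only [pvCountLoopB, pvPairs, List.foldl_append, List.foldl_map, ih]

theorem sublist_filter_iff {c1 c2 : String} {courses : List String} (P : String → Bool)
    (hsub : List.Sublist [c1, c2] courses) :
    (List.Sublist [c1, c2] (courses.filter P) ↔ P c1 = true ∧ P c2 = true) := by
  constructor
  · intro hs
    have h1 : c1 ∈ courses.filter P := hs.subset List.mem_cons_self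
    have h2 : c2 ∈ courses.filter P := hs.subset (by simp)
    exact ⟨(List.mem_filter.mp h1).2, (List.mem_filter.mp h2).2⟩
  · rintro ⟨h1, h2⟩
    have := hsub.filter P
    rwa [List.filter_cons_of_pos h1, List.filter_cons_of_pos h2, List.filter_nil] at this

theorem pv_lookup_mem {a : String} {l : List (String × List Int)} {v : List Int}
    (h : List.lookup a l = some v) : (a, v) ∈ l := by
  induction l with
  | nil => simp [List.lookup] at h
  | cons p rest ih =>
    obtain ⟨k, w⟩ := p
    simp only [List.lookup] at h
    rcases hb : a == k with _ | _
    · rw [hb] at h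
      exact List.mem_cons_of_mem _ (ih h)
    · rw [hb] at h
      obtain rfl : a = k := by simpa using hb
      simp only [Option.some.injEq] at h
      subst h
      exact List.mem_cons_self

theorem pv_lookup_isSome {a : String} {l : List (String × List Int)}
    (h : a ∈ l.map Prod.fst) : (List.lookup a l).isSome := by
  induction l with
  | nil => simp at h
  | cons p rest ih =>
    obtain ⟨k, w⟩ := p
    simp only [List.lookup]
    rcases hb : a == k with _ | _
    · simp only [List.map_cons, List.mem_cons] at h
      rcases h with h | h
      · rw [h] at hb; simp at hb
      · exact ih h
    · rfl

theorem pv_flatMap_if (l : List String) (P : String → Bool) :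
    (l.flatMap (fun c => if P c then [c] else [])) = l.filter P := by
  induction l with
  | nil => rfl
  | cons c rest ih => by_cases h : P c <;> simp [h, ih]

theorem pv_length_eq_of_nodup {l m : List Int} (h1 : l.Nodup) (h2 : m.Nodup)
    (h : ∀ x, x ∈ l ↔ x ∈ m) : l.length = m.length := by
  rw [← List.toFinset_card_of_nodup h1, ← List.toFinset_card_of_nodup h2]
  congr 1
  ext x
  simpa using h x

theorem pvLoopA_eq_pvEmitLoopB (course_students : List (String × List Int))
    (pc : PySem.Dict (String × String) Int) :
    ∀ (L : List String) (d : PySem.Dict (String × String) Int),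
      (∀ c1 c2, List.Sublist [c1, c2] L →
        PySem.Set.len (PySem.Set.inter (pvLookupA course_students c1) (pvLookupA course_students c2))
          = pc.getD (c1, c2) 0) →
      pvLoopA course_students L d = pvEmitLoopB pc L d := by
  intro L
  induction L with
  | nil => intro d _; rfl
  | cons c1 rest ih =>
    intro d H
    simp only [pvLoopA, pvEmitLoopB]
    have hfold : (rest.foldl (fun conflicts c2 =>
          let shared : Int :=
            PySem.Set.len (PySem.Set.inter (pvLookupA course_students c1) (pvLookupA course_students c2))
          if shared > 0 then (conflicts.insert (c1, c2) shared).insert (c2, c1) shared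
          else conflicts) d)
        = (rest.foldl (fun result c2 =>
          let n := pc.getD (c1, c2) 0
          if n > 0 then (result.insert (c1, c2) n).insert (c2, c1) n else result) d) := by
      apply PySem.List.foldl_congr_mem
      intro acc c2 hm
      have := H c1 c2 (List.cons_sublist_cons.mpr (List.singleton_sublist.mpr hm))
      simp only [this]
    rw [hfold]
    exact ih _ (fun a b hs => H a b (hs.cons c1))

-- the central count: B's pair_counts holds exactly A's intersection size, for every
-- ordered pair of distinct keys
theorem pv_pair_counts_getD (cs : List (String × List Int))
    (hkeys : (cs.map Prod.fst).Nodup) (hvals : ∀ p ∈ cs, p.2.Nodup)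
    (c1 c2 : String) (hsub : List.Sublist [c1, c2] (cs.map Prod.fst)) :
    ((pvInvertB cs (cs.map Prod.fst)).values.foldl (fun pc l => pvCountLoopB l pc)
        PySem.Dict.empty).getD (c1, c2) 0
      = PySem.Set.len (PySem.Set.inter (pvLookupA cs c1) (pvLookupA cs c2)) := by
  set courses := cs.map Prod.fst with hcourses
  have hval_of_mem : ∀ c, c ∈ courses → (c, pvLookupA cs c) ∈ cs := by
    intro c hc
    have hs : (List.lookup c cs).isSome := pv_lookup_isSome hc
    obtain ⟨v, hv⟩ := Option.isSome_iff_exists.mp hs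
    have hm := pv_lookup_mem hv
    simpa [pvLookupA, hv] using hm
  have hc1 : c1 ∈ courses := hsub.subset List.mem_cons_self
  have hc2 : c2 ∈ courses := hsub.subset (by simp)
  have hnodup_lookup : ∀ c, c ∈ courses → (pvLookupA cs c).Nodup :=
    fun c hc => hvals _ (hval_of_mem c hc)
  set pairsSC := courses.flatMap (fun c => (pvLookupA cs c).map (fun s => (s, c))) with hpairs
  have hInv : pvInvertB cs courses
      = pairsSC.foldl (fun d p => d.modify p.1 [] (· ++ [p.2])) PySem.Dict.empty := by
    unfold pvInvertB
    rw [hpairs, List.foldl_flatMap]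
    simp only [List.foldl_map]
  have hkeysSC : (pvInvertB cs courses).keys = PySem.Set.ofList (pairsSC.map Prod.fst) := by
    rw [hInv]
    exact PySem.Dict.keys_foldl_modify_key pairsSC Prod.fst [] (fun _ p => (· ++ [p.2]))
      PySem.Dict.empty
  have hnodupkeys : (pvInvertB cs courses).keys.Nodup := by
    rw [hInv]
    exact PySem.Dict.nodup_keys_foldl_modify_key _ Prod.fst [] (fun _ p => (· ++ [p.2])) _
      List.nodup_nil
  have hmem_keys : ∀ s : Int, s ∈ (pvInvertB cs courses).keys ↔ ∃ c ∈ courses, s ∈ pvLookupA cs c := by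
    intro s
    rw [hkeysSC, PySem.Set.mem_ofList]
    simp [hpairs, List.map_flatMap]
  have hgetD : ∀ s : Int, (pvInvertB cs courses).getD s []
      = courses.filter (fun c => (pvLookupA cs c).contains s) := by
    intro s
    rw [hInv, PySem.Dict.getD_foldl_modify_append]
    have hrw : (pairsSC.filter (fun p => p.1 == s)).map (fun p => p.2)
        = courses.flatMap (fun c => if (pvLookupA cs c).contains s then [c] else []) := by
      rw [hpairs, List.filter_flatMap, List.map_flatMap]
      apply List.flatMap_congr
      intro c hc
      rw [List.filter_map, List.map_map]
      have hcomp : ((fun p : Int × String => p.1 == s) ∘ (fun s' : Int => (s', c)))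
          = (fun s' : Int => s' == s) := rfl
      rw [hcomp, List.filter_beq]
      by_cases hm : s ∈ pvLookupA cs c
      · rw [List.count_eq_one_of_mem (hnodup_lookup c hc) hm]
        simp [hm]
      · rw [List.count_eq_zero_of_not_mem hm]
        simp [hm]
    rw [hrw, pv_flatMap_if]
    rfl
  set Q : Int → Bool := fun s => (pvLookupA cs c1).contains s && (pvLookupA cs c2).contains s
    with hQ
  have hpoint : ∀ s : Int,
      (pvPairs (courses.filter (fun c => (pvLookupA cs c).contains s))).count (c1, c2)
        = if Q s then 1 else 0 := by
    intro s
    rw [count_pvPairs (hkeys.filter _)]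
    have hiff := sublist_filter_iff (fun c => (pvLookupA cs c).contains s) hsub
    by_cases hq : Q s = true
    · rw [if_pos (hiff.mpr (by simpa [hQ, Bool.and_eq_true] using hq)), if_pos hq]
    · rw [if_neg (fun hs => hq (by simpa [hQ, Bool.and_eq_true] using hiff.mp hs)), if_neg hq]
  have hchain : (pvInvertB cs courses).values.foldl (fun pc l => pvCountLoopB l pc)
        PySem.Dict.empty
      = ((pvInvertB cs courses).values.flatMap pvPairs).foldl
          (fun pc k => pc.insert k (pc.getD k 0 + 1)) PySem.Dict.empty := by
    rw [List.foldl_flatMap]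
    apply PySem.List.foldl_congr_mem
    intro acc l _
    exact pvCountLoopB_eq l acc
  rw [hchain, PySem.Dict.getD_foldl_insert_add_one, List.count_flatMap]
  have hvalues := PySem.Dict.values_eq_map_keys (pvInvertB cs courses) hnodupkeys
    ([] : List String)
  rw [hvalues, List.map_map]
  have hfun : ((List.count (c1, c2) ∘ pvPairs) ∘
        fun k => (pvInvertB cs courses).getD k [])
      = (fun s => if Q s then 1 else 0) := by
    funext s
    simp only [Function.comp_apply]
    rw [hgetD s, hpoint s]
  rw [hfun, PySem.List.sum_map_ite_one_zero_nat Q, List.countP_eq_length_filter]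
  have hlen : ((pvInvertB cs courses).keys.filter Q).length
      = ((pvLookupA cs c1).filter (fun x => (pvLookupA cs c2).contains x)).length := by
    apply pv_length_eq_of_nodup (hnodupkeys.filter Q)
      ((hnodup_lookup c1 hc1).filter _)
    intro x
    simp only [List.mem_filter, hmem_keys x, hQ, Bool.and_eq_true, List.contains_iff_mem]
    constructor
    · rintro ⟨_, hx1, hx2⟩
      exact ⟨hx1, hx2⟩
    · rintro ⟨hx1, hx2⟩
      exact ⟨⟨c1, hc1, hx1⟩, hx1, hx2⟩
  rw [hlen]
  simp [PySem.Set.len, PySem.Set.inter, PySem.Dict.getD, PySem.Dict.get?, PySem.Dict.empty]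

-- ===== VERDICT (by name: the statement is the Claim_ definition above) =====
theorem build_conflict_matrix_spec : Claim_equal_build_conflict_matrix := by
  intro cs _ hpre
  obtain ⟨hkeys, hvals⟩ := hpre
  have hloop : pvLoopA cs (cs.map Prod.fst) PySem.Dict.empty
      = pvEmitLoopB ((pvInvertB cs (cs.map Prod.fst)).values.foldl
          (fun pc l => pvCountLoopB l pc) PySem.Dict.empty) (cs.map Prod.fst) PySem.Dict.empty := by
    apply pvLoopA_eq_pvEmitLoopB
    intro c1 c2 hsub
    exact (pv_pair_counts_getD cs hkeys hvals c1 c2 hsub).symm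
  show build_conflict_matrix cs = build_conflict_matrix_alt cs
  unfold build_conflict_matrix build_conflict_matrix_alt
  simp only [hloop]
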